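-- pv_equiv track=rewrite | github.com/ethereum/execution-specs | cli/show_pre_alloc_group_stats.py | calculate_size_distribution
-- ===== SOURCE A (Python) =====
-- from typing import Dict, List, Set, Tuple
--
-- def calculate_size_distribution(
--     test_counts: List[int],
-- ) -> Tuple[List[Tuple[str, int]], List[Tuple[str, int, int, int]]]:
--     """
--     Calculate frequency distribution of group sizes with appropriate binning.
--
--     Returns:
--         - Group count distribution: [(range_label, group_count), ...]
--         - Test count distribution: [(range_label, test_count, cumulative_remaining, group_count),
--             ...]
--
--     """
--     if not test_counts:
--         return [], []
--
--     # Define bins based on the data characteristics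
--     # Using logarithmic-style bins for better distribution visibility
--     bins = [
--         (1, 1, "1"),
--         (2, 5, "2-5"),
--         (6, 10, "6-10"),
--         (11, 20, "11-20"),
--         (21, 50, "21-50"),
--         (51, 100, "51-100"),
--         (101, 200, "101-200"),
--         (201, 500, "201-500"),
--         (501, 1000, "501-1000"),
--         (1001, float("inf"), "1000+"),
--     ]
--
--     # Calculate both distributions
--     group_distribution = []
--     test_distribution = []
--
--     for min_val, max_val, label in bins:
--         # Group count distribution
--         groups_in_bin = [tc for tc in test_counts if min_val <= tc <= max_val]
--         group_count = len(groups_in_bin)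
--
--         if group_count > 0:
--             group_distribution.append((label, group_count))
--
--             # Test count distribution with group count
--             tests_in_bin = sum(groups_in_bin)
--             test_distribution.append((label, tests_in_bin, 0, group_count))  # Added group_count
--
--     # Calculate cumulative values
--     # For the table sorted from largest to smallest:
--     # - Row N shows: if we exclude groups of size N and smaller, what % of tests remain?
--     # - Row N shows: if we include groups of size N and larger, how many groups is that?
--
--     cumulative_remaining_tests = 0
--     cumulative_groups = 0
--
--     # Process from bottom to top
--     for i in range(len(test_distribution) - 1, -1, -1):
--         label, tests_in_bin, _, group_count = test_distribution[i]
--         test_distribution[i] = (label, tests_in_bin, cumulative_remaining_tests, cumulative_groups)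
--         cumulative_remaining_tests += tests_in_bin
--         cumulative_groups += group_count
--
--     return group_distribution, test_distribution
-- ===== SOURCE B (Python) =====
-- from typing import List, Tuple
--
-- _UPPERS = [1, 5, 10, 20, 50, 100, 200, 500, 1000]
-- _LABELS = ["1", "2-5", "6-10", "11-20", "21-50", "51-100", "101-200", "201-500", "501-1000", "1000+"]
--
--
-- def _bin_index(tc: int) -> int:
--     """Bin index for a count >= 1 (explicit threshold chain)."""
--     for i, upper in enumerate(_UPPERS):
--         if tc <= upper:
--             return i
--     return 9
--
--
-- def calculate_size_distribution(
--     test_counts: List[int],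
-- ) -> Tuple[List[Tuple[str, int]], List[Tuple[str, int, int, int]]]:
--     # One histogram pass: per-bin group counts and per-bin test sums.
--     counts = [0] * 10
--     sums = [0] * 10
--     for tc in test_counts:
--         if tc >= 1:
--             i = _bin_index(tc)
--             counts[i] += 1
--             sums[i] += tc
--     # Assemble both distributions back-to-front, accumulating the
--     # cumulative values on the way (only non-empty bins are emitted).
--     group_distribution = []
--     test_distribution = []
--     cum_tests = 0
--     cum_groups = 0
--     for label, cnt, sm in reversed(list(zip(_LABELS, counts, sums))):
--         if cnt > 0:
--             group_distribution.insert(0, (label, cnt))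
--             test_distribution.insert(0, (label, sm, cum_tests, cum_groups))
--             cum_tests += sm
--             cum_groups += cnt
--     return group_distribution, test_distribution
-- ===== Notes on version B (the rewrite author's own statement) =====
-- stated objective: simpler
-- what changed: Replaces A's ten per-bin filtering scans of test_counts plus a separate index-based backward rewrite pass with a single histogram pass (per-bin counts and sums via a bin-index threshold chain) followed by one back-to-front assembly loop that builds both distributions with the cumulative values accumulated on the way.
import Mathlib
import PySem

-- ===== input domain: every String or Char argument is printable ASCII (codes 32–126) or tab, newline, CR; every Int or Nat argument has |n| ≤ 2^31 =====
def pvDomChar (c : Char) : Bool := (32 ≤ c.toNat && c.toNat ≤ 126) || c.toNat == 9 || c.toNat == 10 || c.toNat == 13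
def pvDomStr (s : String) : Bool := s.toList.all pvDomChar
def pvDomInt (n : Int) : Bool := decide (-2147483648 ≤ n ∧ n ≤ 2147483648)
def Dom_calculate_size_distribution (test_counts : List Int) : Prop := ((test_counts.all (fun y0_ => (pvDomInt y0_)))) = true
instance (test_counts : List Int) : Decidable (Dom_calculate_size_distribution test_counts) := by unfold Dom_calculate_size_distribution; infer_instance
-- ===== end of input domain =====

-- B replaces A's ten filtering scans and separate backward cumulative pass with one
-- histogram pass plus one back-to-front assembly loop (objective: simpler).

-- ===== PORT A =====
-- bins as (min_val, max_val, label); the float("inf") upper bound of the last bin is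
-- `none` (the test `tc <= inf` is always true, exactly what `Option.all` gives on `none`)
def pvBins : List (Int × Option Int × String) :=
  [(1, some 1, "1"), (2, some 5, "2-5"), (6, some 10, "6-10"), (11, some 20, "11-20"),
   (21, some 50, "21-50"), (51, some 100, "51-100"), (101, some 200, "101-200"),
   (201, some 500, "201-500"), (501, some 1000, "501-1000"), (1001, none, "1000+")]

-- loop body of A's `for min_val, max_val, label in bins`
def pvAFilterStep (test_counts : List Int)
    (st : List (String × Int) × List (String × Int × Int × Int))
    (bin : Int × Option Int × String) :
    List (String × Int) × List (String × Int × Int × Int) :=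
  let groups_in_bin := test_counts.filter (fun tc => bin.1 ≤ tc && bin.2.1.all (fun m => decide (tc ≤ m)))
  let group_count : Int := groups_in_bin.length
  if group_count > 0 then
    (st.1 ++ [(bin.2.2, group_count)],
     st.2 ++ [(bin.2.2, groups_in_bin.sum, 0, group_count)])
  else st

-- loop body of A's `for i in range(len(test_distribution) - 1, -1, -1)`;
-- the loop index is always in range, so the total pyGetD/pySetD forms are exact here
def pvACumStep (st : List (String × Int × Int × Int) × Int × Int) (i : Int) :
    List (String × Int × Int × Int) × Int × Int :=
  let e := PySem.List.pyGetD st.1 i ("", 0, 0, 0)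
  (PySem.List.pySetD st.1 i (e.1, e.2.1, st.2.1, st.2.2),
   st.2.1 + e.2.1, st.2.2 + e.2.2.2)

def calculate_size_distribution (test_counts : List Int) :
    (List (String × Int)) × (List (String × Int × Int × Int)) :=
  if test_counts = [] then ([], [])
  else
    let dists := pvBins.foldl (pvAFilterStep test_counts) ([], [])
    let fin := (PySem.List.pyRange (PySem.List.len dists.2 - 1) (-1) (-1)).foldl
      pvACumStep (dists.2, 0, 0)
    (dists.1, fin.1)

-- ===== PORT B =====
def pvUppers : List Int := [1, 5, 10, 20, 50, 100, 200, 500, 1000]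
def pvLabels : List String :=
  ["1", "2-5", "6-10", "11-20", "21-50", "51-100", "101-200", "201-500", "501-1000", "1000+"]

-- `for i, upper in enumerate(_UPPERS): if tc <= upper: return i` / `return 9`
def pvBinIndexLoop (tc : Int) : List (Int × Int) → Int
  | [] => 9
  | (i, upper) :: rest => if tc ≤ upper then i else pvBinIndexLoop tc rest

def pv_bin_index (tc : Int) : Int := pvBinIndexLoop tc (PySem.List.enumerate pvUppers 0)

-- histogram loop body (`counts[i] += 1; sums[i] += tc`); the index is always 0..9, in range
def pvBHistStep (st : List Int × List Int) (tc : Int) : List Int × List Int :=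
  if 1 ≤ tc then
    let i := pv_bin_index tc
    (PySem.List.pySetD st.1 i (PySem.List.pyGetD st.1 i 0 + 1),
     PySem.List.pySetD st.2 i (PySem.List.pyGetD st.2 i 0 + tc))
  else st

-- assembly loop body (front-insertion plus cumulative accumulators)
def pvBAsmStep (st : List (String × Int) × List (String × Int × Int × Int) × Int × Int)
    (z : String × Int × Int) :
    List (String × Int) × List (String × Int × Int × Int) × Int × Int :=
  if z.2.1 > 0 then
    (PySem.List.insert st.1 0 (z.1, z.2.1),
     PySem.List.insert st.2.1 0 (z.1, z.2.2, st.2.2.1, st.2.2.2),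
     st.2.2.1 + z.2.2, st.2.2.2 + z.2.1)
  else st

def calculate_size_distribution_alt (test_counts : List Int) :
    (List (String × Int)) × (List (String × Int × Int × Int)) :=
  let hist := test_counts.foldl pvBHistStep
    ([0, 0, 0, 0, 0, 0, 0, 0, 0, 0], [0, 0, 0, 0, 0, 0, 0, 0, 0, 0])
  let res := ((pvLabels.zip (hist.1.zip hist.2)).reverse).foldl pvBAsmStep ([], [], 0, 0)
  (res.1, res.2.1)

-- ===== PRECONDITION & SPEC =====
def Spec_calculate_size_distribution (test_counts : List Int) (out : (List (String × Int)) × (List (String × Int × Int × Int))) : Prop := out = calculate_size_distribution_alt test_counts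
instance (test_counts : List Int) (out : (List (String × Int)) × (List (String × Int × Int × Int))) : Decidable (Spec_calculate_size_distribution test_counts out) := by unfold Spec_calculate_size_distribution; infer_instance

-- ===== CLAIM (what is proved, stated in full; the proofs are below) =====
def Claim_equal_calculate_size_distribution : Prop := ∀ (test_counts : List Int), Dom_calculate_size_distribution test_counts → Spec_calculate_size_distribution test_counts (calculate_size_distribution test_counts)

-- ===== LEMMAS AND PROOFS =====

-- per-bin group count (as Int) and test sum, the quantities both programs compute
def pvCnt (lo : Int) (hi : Option Int) (l : List Int) : Int :=
  (l.countP (fun tc => lo ≤ tc && hi.all (fun m => decide (tc ≤ m))) : Int)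
def pvSum (lo : Int) (hi : Option Int) (l : List Int) : Int :=
  (l.filter (fun tc => lo ≤ tc && hi.all (fun m => decide (tc ≤ m)))).sum

-- total tests / groups of a test_distribution fragment
def pvTS (l : List (String × Int × Int × Int)) : Int := (l.map (fun e => e.2.1)).sum
def pvGS (l : List (String × Int × Int × Int)) : Int := (l.map (fun e => e.2.2.2)).sum

-- the suffix-cumulative annotation both programs end up producing
def pvSuff : List (String × Int × Int × Int) → Int → Int → List (String × Int × Int × Int)
  | [], _, _ => []
  | e :: rest, ct, cg => (e.1, e.2.1, ct + pvTS rest, cg + pvGS rest) :: pvSuff rest ct cg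

theorem pvSuff_append_singleton (l : List (String × Int × Int × Int)) (e : String × Int × Int × Int) (ct cg : Int) :
    pvSuff (l ++ [e]) ct cg = pvSuff l (ct + e.2.1) (cg + e.2.2.2) ++ [(e.1, e.2.1, ct, cg)] := by
  induction l with
  | nil => simp [pvSuff, pvTS, pvGS]
  | cons x xs ih => simp [pvSuff, ih, pvTS, pvGS]; ring_nf; simp

-- A's first loop builds the filtered per-bin statistics
theorem pvA_phase1 (tcs : List Int) (bins : List (Int × Option Int × String))
    (g : List (String × Int)) (t : List (String × Int × Int × Int)) :
    bins.foldl (pvAFilterStep tcs) (g, t) =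
      (g ++ (bins.filter (fun b => 0 < pvCnt b.1 b.2.1 tcs)).map
          (fun b => (b.2.2, pvCnt b.1 b.2.1 tcs)),
       t ++ (bins.filter (fun b => 0 < pvCnt b.1 b.2.1 tcs)).map
          (fun b => (b.2.2, pvSum b.1 b.2.1 tcs, 0, pvCnt b.1 b.2.1 tcs))) := by
  induction bins generalizing g t with
  | nil => simp
  | cons b bs ih =>
    simp only [List.foldl_cons, List.filter_cons]
    have hcnt : ((List.filter (fun tc => b.1 ≤ tc && Option.all (fun m => decide (tc ≤ m)) b.2.1) tcs).length : Int) = pvCnt b.1 b.2.1 tcs := by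
      simp [pvCnt, List.countP_eq_length_filter]
    by_cases h : 0 < pvCnt b.1 b.2.1 tcs
    · rw [show pvAFilterStep tcs (g, t) b =
        (g ++ [(b.2.2, pvCnt b.1 b.2.1 tcs)], t ++ [(b.2.2, pvSum b.1 b.2.1 tcs, 0, pvCnt b.1 b.2.1 tcs)]) from by
          simp only [pvAFilterStep, hcnt]; rw [if_pos h]; rfl]
      simp [h, ih]
    · rw [show pvAFilterStep tcs (g, t) b = (g, t) from by
        simp only [pvAFilterStep, hcnt]; rw [if_neg h]]
      simp [h, ih]

-- A's backward index loop is the suffix-cumulative annotation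
theorem pvA_cum (l s : List (String × Int × Int × Int)) (ct cg : Int) :
    (PySem.List.pyRange ((l.length : Int) - 1) (-1) (-1)).foldl pvACumStep (l ++ s, ct, cg) =
      (pvSuff l ct cg ++ s, ct + pvTS l, cg + pvGS l) := by
  induction l using List.reverseRecOn generalizing s ct cg with
  | nil =>
    rw [PySem.List.pyRange_neg_one_eq_nil (by simp)]
    simp [pvSuff, pvTS, pvGS]
  | append_singleton l' e ih =>
    have hlen : ((l' ++ [e]).length : Int) - 1 = (l'.length : Int) := by simp
    rw [hlen, PySem.List.pyRange_neg_one_cons (by omega)]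
    have hstep : pvACumStep (l' ++ [e] ++ s, ct, cg) ((l'.length : Int)) =
        (l' ++ (e.1, e.2.1, ct, cg) :: s, ct + e.2.1, cg + e.2.2.2) := by
      have hget : PySem.List.pyGetD (l' ++ [e] ++ s) ((l'.length : Int)) ("", 0, 0, 0) = e := by
        simp [List.append_assoc, List.getD_eq_getElem?_getD]
      have hset : PySem.List.pySetD (l' ++ [e] ++ s) ((l'.length : Int)) (e.1, e.2.1, ct, cg) =
          l' ++ (e.1, e.2.1, ct, cg) :: s := by
        simp [List.append_assoc, List.set_append_right]
      simp only [pvACumStep, hget, hset]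
    rw [List.foldl_cons, hstep, ih]
    rw [pvSuff_append_singleton]
    simp [pvTS, pvGS]
    constructor <;> ring

-- the bin-index threshold chain, unfolded
theorem pv_bin_index_eq (tc : Int) :
    pv_bin_index tc =
      if tc ≤ 1 then 0 else if tc ≤ 5 then 1 else if tc ≤ 10 then 2 else if tc ≤ 20 then 3
      else if tc ≤ 50 then 4 else if tc ≤ 100 then 5 else if tc ≤ 200 then 6
      else if tc ≤ 500 then 7 else if tc ≤ 1000 then 8 else 9 := by
  simp [pv_bin_index, pvUppers, PySem.List.enumerate, pvBinIndexLoop]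

-- B's histogram loop computes exactly the per-bin counts and sums A's filters compute
set_option maxHeartbeats 2000000 in
theorem pvB_hist (l : List Int)
    (a0 a1 a2 a3 a4 a5 a6 a7 a8 a9 b0 b1 b2 b3 b4 b5 b6 b7 b8 b9 : Int) :
    l.foldl pvBHistStep ([a0, a1, a2, a3, a4, a5, a6, a7, a8, a9],
                         [b0, b1, b2, b3, b4, b5, b6, b7, b8, b9]) =
      ([a0 + pvCnt 1 (some 1) l, a1 + pvCnt 2 (some 5) l, a2 + pvCnt 6 (some 10) l,
        a3 + pvCnt 11 (some 20) l, a4 + pvCnt 21 (some 50) l, a5 + pvCnt 51 (some 100) l,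
        a6 + pvCnt 101 (some 200) l, a7 + pvCnt 201 (some 500) l, a8 + pvCnt 501 (some 1000) l,
        a9 + pvCnt 1001 none l],
       [b0 + pvSum 1 (some 1) l, b1 + pvSum 2 (some 5) l, b2 + pvSum 6 (some 10) l,
        b3 + pvSum 11 (some 20) l, b4 + pvSum 21 (some 50) l, b5 + pvSum 51 (some 100) l,
        b6 + pvSum 101 (some 200) l, b7 + pvSum 201 (some 500) l, b8 + pvSum 501 (some 1000) l,
        b9 + pvSum 1001 none l]) := by
  induction l generalizing a0 a1 a2 a3 a4 a5 a6 a7 a8 a9 b0 b1 b2 b3 b4 b5 b6 b7 b8 b9 with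
  | nil => simp [pvCnt, pvSum]
  | cons tc l ih =>
    by_cases hpos : 1 ≤ tc
    · -- tc lands in exactly one bin
      by_cases h1 : tc ≤ 1
      · have hidx : pv_bin_index tc = 0 := by rw [pv_bin_index_eq]; simp [h1]
        have hstep : pvBHistStep ([a0, a1, a2, a3, a4, a5, a6, a7, a8, a9], [b0, b1, b2, b3, b4, b5, b6, b7, b8, b9]) tc =
            ([a0 + 1, a1, a2, a3, a4, a5, a6, a7, a8, a9],
             [b0 + tc, b1, b2, b3, b4, b5, b6, b7, b8, b9]) := by
          simp only [pvBHistStep, hidx, if_pos hpos]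
          rw [show ((0:Int)) = ((0:Nat):Int) from rfl, PySem.List.pySetD_natCast, PySem.List.pySetD_natCast, PySem.List.pyGetD_natCast, PySem.List.pyGetD_natCast]
          rfl
        rw [List.foldl_cons, hstep, ih]
        simp only [pvCnt, pvSum, List.countP_cons, List.filter_cons, Option.all_some, Option.all_none]
        simp [show (1:Int) ≤ tc from by omega, show tc ≤ (1:Int) from by omega, show ¬ (2:Int) ≤ tc from by omega, show ¬ (6:Int) ≤ tc from by omega, show ¬ (11:Int) ≤ tc from by omega, show ¬ (21:Int) ≤ tc from by omega, show ¬ (51:Int) ≤ tc from by omega, show ¬ (101:Int) ≤ tc from by omega, show ¬ (201:Int) ≤ tc from by omega, show ¬ (501:Int) ≤ tc from by omega, show ¬ (1001:Int) ≤ tc from by omega]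
        omega
      · by_cases h2 : tc ≤ 5
        · have hidx : pv_bin_index tc = 1 := by rw [pv_bin_index_eq]; simp [h1, h2]
          have hstep : pvBHistStep ([a0, a1, a2, a3, a4, a5, a6, a7, a8, a9], [b0, b1, b2, b3, b4, b5, b6, b7, b8, b9]) tc =
              ([a0, a1 + 1, a2, a3, a4, a5, a6, a7, a8, a9],
               [b0, b1 + tc, b2, b3, b4, b5, b6, b7, b8, b9]) := by
            simp only [pvBHistStep, hidx, if_pos hpos]
            rw [show ((1:Int)) = ((1:Nat):Int) from rfl, PySem.List.pySetD_natCast, PySem.List.pySetD_natCast, PySem.List.pyGetD_natCast, PySem.List.pyGetD_natCast]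
            rfl
          rw [List.foldl_cons, hstep, ih]
          simp only [pvCnt, pvSum, List.countP_cons, List.filter_cons, Option.all_some, Option.all_none]
          simp [show ¬ tc ≤ (1:Int) from by omega, show (2:Int) ≤ tc from by omega, show tc ≤ (5:Int) from by omega, show ¬ (6:Int) ≤ tc from by omega, show ¬ (11:Int) ≤ tc from by omega, show ¬ (21:Int) ≤ tc from by omega, show ¬ (51:Int) ≤ tc from by omega, show ¬ (101:Int) ≤ tc from by omega, show ¬ (201:Int) ≤ tc from by omega, show ¬ (501:Int) ≤ tc from by omega, show ¬ (1001:Int) ≤ tc from by omega]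
          omega
        · by_cases h3 : tc ≤ 10
          · have hidx : pv_bin_index tc = 2 := by rw [pv_bin_index_eq]; simp [h1, h2, h3]
            have hstep : pvBHistStep ([a0, a1, a2, a3, a4, a5, a6, a7, a8, a9], [b0, b1, b2, b3, b4, b5, b6, b7, b8, b9]) tc =
                ([a0, a1, a2 + 1, a3, a4, a5, a6, a7, a8, a9],
                 [b0, b1, b2 + tc, b3, b4, b5, b6, b7, b8, b9]) := by
              simp only [pvBHistStep, hidx, if_pos hpos]
              rw [show ((2:Int)) = ((2:Nat):Int) from rfl, PySem.List.pySetD_natCast, PySem.List.pySetD_natCast, PySem.List.pyGetD_natCast, PySem.List.pyGetD_natCast]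
              rfl
            rw [List.foldl_cons, hstep, ih]
            simp only [pvCnt, pvSum, List.countP_cons, List.filter_cons, Option.all_some, Option.all_none]
            simp [show ¬ tc ≤ (1:Int) from by omega, show ¬ tc ≤ (5:Int) from by omega, show (6:Int) ≤ tc from by omega, show tc ≤ (10:Int) from by omega, show ¬ (11:Int) ≤ tc from by omega, show ¬ (21:Int) ≤ tc from by omega, show ¬ (51:Int) ≤ tc from by omega, show ¬ (101:Int) ≤ tc from by omega, show ¬ (201:Int) ≤ tc from by omega, show ¬ (501:Int) ≤ tc from by omega, show ¬ (1001:Int) ≤ tc from by omega]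
            omega
          · by_cases h4 : tc ≤ 20
            · have hidx : pv_bin_index tc = 3 := by rw [pv_bin_index_eq]; simp [h1, h2, h3, h4]
              have hstep : pvBHistStep ([a0, a1, a2, a3, a4, a5, a6, a7, a8, a9], [b0, b1, b2, b3, b4, b5, b6, b7, b8, b9]) tc =
                  ([a0, a1, a2, a3 + 1, a4, a5, a6, a7, a8, a9],
                   [b0, b1, b2, b3 + tc, b4, b5, b6, b7, b8, b9]) := by
                simp only [pvBHistStep, hidx, if_pos hpos]
                rw [show ((3:Int)) = ((3:Nat):Int) from rfl, PySem.List.pySetD_natCast, PySem.List.pySetD_natCast, PySem.List.pyGetD_natCast, PySem.List.pyGetD_natCast]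
                rfl
              rw [List.foldl_cons, hstep, ih]
              simp only [pvCnt, pvSum, List.countP_cons, List.filter_cons, Option.all_some, Option.all_none]
              simp [show ¬ tc ≤ (1:Int) from by omega, show ¬ tc ≤ (5:Int) from by omega, show ¬ tc ≤ (10:Int) from by omega, show (11:Int) ≤ tc from by omega, show tc ≤ (20:Int) from by omega, show ¬ (21:Int) ≤ tc from by omega, show ¬ (51:Int) ≤ tc from by omega, show ¬ (101:Int) ≤ tc from by omega, show ¬ (201:Int) ≤ tc from by omega, show ¬ (501:Int) ≤ tc from by omega, show ¬ (1001:Int) ≤ tc from by omega]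
              omega
            · by_cases h5 : tc ≤ 50
              · have hidx : pv_bin_index tc = 4 := by rw [pv_bin_index_eq]; simp [h1, h2, h3, h4, h5]
                have hstep : pvBHistStep ([a0, a1, a2, a3, a4, a5, a6, a7, a8, a9], [b0, b1, b2, b3, b4, b5, b6, b7, b8, b9]) tc =
                    ([a0, a1, a2, a3, a4 + 1, a5, a6, a7, a8, a9],
                     [b0, b1, b2, b3, b4 + tc, b5, b6, b7, b8, b9]) := by
                  simp only [pvBHistStep, hidx, if_pos hpos]
                  rw [show ((4:Int)) = ((4:Nat):Int) from rfl, PySem.List.pySetD_natCast, PySem.List.pySetD_natCast, PySem.List.pyGetD_natCast, PySem.List.pyGetD_natCast]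
                  rfl
                rw [List.foldl_cons, hstep, ih]
                simp only [pvCnt, pvSum, List.countP_cons, List.filter_cons, Option.all_some, Option.all_none]
                simp [show ¬ tc ≤ (1:Int) from by omega, show ¬ tc ≤ (5:Int) from by omega, show ¬ tc ≤ (10:Int) from by omega, show ¬ tc ≤ (20:Int) from by omega, show (21:Int) ≤ tc from by omega, show tc ≤ (50:Int) from by omega, show ¬ (51:Int) ≤ tc from by omega, show ¬ (101:Int) ≤ tc from by omega, show ¬ (201:Int) ≤ tc from by omega, show ¬ (501:Int) ≤ tc from by omega, show ¬ (1001:Int) ≤ tc from by omega]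
                omega
              · by_cases h6 : tc ≤ 100
                · have hidx : pv_bin_index tc = 5 := by rw [pv_bin_index_eq]; simp [h1, h2, h3, h4, h5, h6]
                  have hstep : pvBHistStep ([a0, a1, a2, a3, a4, a5, a6, a7, a8, a9], [b0, b1, b2, b3, b4, b5, b6, b7, b8, b9]) tc =
                      ([a0, a1, a2, a3, a4, a5 + 1, a6, a7, a8, a9],
                       [b0, b1, b2, b3, b4, b5 + tc, b6, b7, b8, b9]) := by
                    simp only [pvBHistStep, hidx, if_pos hpos]
                    rw [show ((5:Int)) = ((5:Nat):Int) from rfl, PySem.List.pySetD_natCast, PySem.List.pySetD_natCast, PySem.List.pyGetD_natCast, PySem.List.pyGetD_natCast]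
                    rfl
                  rw [List.foldl_cons, hstep, ih]
                  simp only [pvCnt, pvSum, List.countP_cons, List.filter_cons, Option.all_some, Option.all_none]
                  simp [show ¬ tc ≤ (1:Int) from by omega, show ¬ tc ≤ (5:Int) from by omega, show ¬ tc ≤ (10:Int) from by omega, show ¬ tc ≤ (20:Int) from by omega, show ¬ tc ≤ (50:Int) from by omega, show (51:Int) ≤ tc from by omega, show tc ≤ (100:Int) from by omega, show ¬ (101:Int) ≤ tc from by omega, show ¬ (201:Int) ≤ tc from by omega, show ¬ (501:Int) ≤ tc from by omega, show ¬ (1001:Int) ≤ tc from by omega]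
                  omega
                · by_cases h7 : tc ≤ 200
                  · have hidx : pv_bin_index tc = 6 := by rw [pv_bin_index_eq]; simp [h1, h2, h3, h4, h5, h6, h7]
                    have hstep : pvBHistStep ([a0, a1, a2, a3, a4, a5, a6, a7, a8, a9], [b0, b1, b2, b3, b4, b5, b6, b7, b8, b9]) tc =
                        ([a0, a1, a2, a3, a4, a5, a6 + 1, a7, a8, a9],
                         [b0, b1, b2, b3, b4, b5, b6 + tc, b7, b8, b9]) := by
                      simp only [pvBHistStep, hidx, if_pos hpos]
                      rw [show ((6:Int)) = ((6:Nat):Int) from rfl, PySem.List.pySetD_natCast, PySem.List.pySetD_natCast, PySem.List.pyGetD_natCast, PySem.List.pyGetD_natCast]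
                      rfl
                    rw [List.foldl_cons, hstep, ih]
                    simp only [pvCnt, pvSum, List.countP_cons, List.filter_cons, Option.all_some, Option.all_none]
                    simp [show ¬ tc ≤ (1:Int) from by omega, show ¬ tc ≤ (5:Int) from by omega, show ¬ tc ≤ (10:Int) from by omega, show ¬ tc ≤ (20:Int) from by omega, show ¬ tc ≤ (50:Int) from by omega, show ¬ tc ≤ (100:Int) from by omega, show (101:Int) ≤ tc from by omega, show tc ≤ (200:Int) from by omega, show ¬ (201:Int) ≤ tc from by omega, show ¬ (501:Int) ≤ tc from by omega, show ¬ (1001:Int) ≤ tc from by omega]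
                    omega
                  · by_cases h8 : tc ≤ 500
                    · have hidx : pv_bin_index tc = 7 := by rw [pv_bin_index_eq]; simp [h1, h2, h3, h4, h5, h6, h7, h8]
                      have hstep : pvBHistStep ([a0, a1, a2, a3, a4, a5, a6, a7, a8, a9], [b0, b1, b2, b3, b4, b5, b6, b7, b8, b9]) tc =
                          ([a0, a1, a2, a3, a4, a5, a6, a7 + 1, a8, a9],
                           [b0, b1, b2, b3, b4, b5, b6, b7 + tc, b8, b9]) := by
                        simp only [pvBHistStep, hidx, if_pos hpos]
                        rw [show ((7:Int)) = ((7:Nat):Int) from rfl, PySem.List.pySetD_natCast, PySem.List.pySetD_natCast, PySem.List.pyGetD_natCast, PySem.List.pyGetD_natCast]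
                        rfl
                      rw [List.foldl_cons, hstep, ih]
                      simp only [pvCnt, pvSum, List.countP_cons, List.filter_cons, Option.all_some, Option.all_none]
                      simp [show ¬ tc ≤ (1:Int) from by omega, show ¬ tc ≤ (5:Int) from by omega, show ¬ tc ≤ (10:Int) from by omega, show ¬ tc ≤ (20:Int) from by omega, show ¬ tc ≤ (50:Int) from by omega, show ¬ tc ≤ (100:Int) from by omega, show ¬ tc ≤ (200:Int) from by omega, show (201:Int) ≤ tc from by omega, show tc ≤ (500:Int) from by omega, show ¬ (501:Int) ≤ tc from by omega, show ¬ (1001:Int) ≤ tc from by omega]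
                      omega
                    · by_cases h9 : tc ≤ 1000
                      · have hidx : pv_bin_index tc = 8 := by rw [pv_bin_index_eq]; simp [h1, h2, h3, h4, h5, h6, h7, h8, h9]
                        have hstep : pvBHistStep ([a0, a1, a2, a3, a4, a5, a6, a7, a8, a9], [b0, b1, b2, b3, b4, b5, b6, b7, b8, b9]) tc =
                            ([a0, a1, a2, a3, a4, a5, a6, a7, a8 + 1, a9],
                             [b0, b1, b2, b3, b4, b5, b6, b7, b8 + tc, b9]) := by
                          simp only [pvBHistStep, hidx, if_pos hpos]
                          rw [show ((8:Int)) = ((8:Nat):Int) from rfl, PySem.List.pySetD_natCast, PySem.List.pySetD_natCast, PySem.List.pyGetD_natCast, PySem.List.pyGetD_natCast]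
                          rfl
                        rw [List.foldl_cons, hstep, ih]
                        simp only [pvCnt, pvSum, List.countP_cons, List.filter_cons, Option.all_some, Option.all_none]
                        simp [show ¬ tc ≤ (1:Int) from by omega, show ¬ tc ≤ (5:Int) from by omega, show ¬ tc ≤ (10:Int) from by omega, show ¬ tc ≤ (20:Int) from by omega, show ¬ tc ≤ (50:Int) from by omega, show ¬ tc ≤ (100:Int) from by omega, show ¬ tc ≤ (200:Int) from by omega, show ¬ tc ≤ (500:Int) from by omega, show (501:Int) ≤ tc from by omega, show tc ≤ (1000:Int) from by omega, show ¬ (1001:Int) ≤ tc from by omega]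
                        omega
                      · have hidx : pv_bin_index tc = 9 := by rw [pv_bin_index_eq]; simp [h1, h2, h3, h4, h5, h6, h7, h8, h9]
                        have hstep : pvBHistStep ([a0, a1, a2, a3, a4, a5, a6, a7, a8, a9], [b0, b1, b2, b3, b4, b5, b6, b7, b8, b9]) tc =
                            ([a0, a1, a2, a3, a4, a5, a6, a7, a8, a9 + 1],
                             [b0, b1, b2, b3, b4, b5, b6, b7, b8, b9 + tc]) := by
                          simp only [pvBHistStep, hidx, if_pos hpos]
                          rw [show ((9:Int)) = ((9:Nat):Int) from rfl, PySem.List.pySetD_natCast, PySem.List.pySetD_natCast, PySem.List.pyGetD_natCast, PySem.List.pyGetD_natCast]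
                          rfl
                        rw [List.foldl_cons, hstep, ih]
                        simp only [pvCnt, pvSum, List.countP_cons, List.filter_cons, Option.all_some, Option.all_none]
                        simp [show ¬ tc ≤ (1:Int) from by omega, show ¬ tc ≤ (5:Int) from by omega, show ¬ tc ≤ (10:Int) from by omega, show ¬ tc ≤ (20:Int) from by omega, show ¬ tc ≤ (50:Int) from by omega, show ¬ tc ≤ (100:Int) from by omega, show ¬ tc ≤ (200:Int) from by omega, show ¬ tc ≤ (500:Int) from by omega, show ¬ tc ≤ (1000:Int) from by omega, show (1001:Int) ≤ tc from by omega]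
                        omega
    · rw [List.foldl_cons, show pvBHistStep ([a0, a1, a2, a3, a4, a5, a6, a7, a8, a9], [b0, b1, b2, b3, b4, b5, b6, b7, b8, b9]) tc = ([a0, a1, a2, a3, a4, a5, a6, a7, a8, a9], [b0, b1, b2, b3, b4, b5, b6, b7, b8, b9]) from by rw [pvBHistStep, if_neg hpos], ih]
      simp only [pvCnt, pvSum, List.countP_cons, List.filter_cons, Option.all_some, Option.all_none]
      simp [show ¬ (1:Int) ≤ tc from hpos, show ¬ (2:Int) ≤ tc from by omega, show ¬ (6:Int) ≤ tc from by omega, show ¬ (11:Int) ≤ tc from by omega, show ¬ (21:Int) ≤ tc from by omega, show ¬ (51:Int) ≤ tc from by omega, show ¬ (101:Int) ≤ tc from by omega, show ¬ (201:Int) ≤ tc from by omega, show ¬ (501:Int) ≤ tc from by omega, show ¬ (1001:Int) ≤ tc from by omega]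

-- B's assembly loop, read as a foldr, produces the filtered lists with suffix cumulatives
theorem pvB_asm (zs : List (String × Int × Int)) :
    zs.foldr (fun z st => pvBAsmStep st z) ([], [], 0, 0) =
      ((zs.filter (fun z => 0 < z.2.1)).map (fun z => (z.1, z.2.1)),
       pvSuff ((zs.filter (fun z => 0 < z.2.1)).map (fun z => (z.1, z.2.2, 0, z.2.1))) 0 0,
       pvTS ((zs.filter (fun z => 0 < z.2.1)).map (fun z => (z.1, z.2.2, 0, z.2.1))),
       pvGS ((zs.filter (fun z => 0 < z.2.1)).map (fun z => (z.1, z.2.2, 0, z.2.1)))) := by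
  induction zs with
  | nil => simp [pvSuff, pvTS, pvGS]
  | cons z zs ih =>
    rw [List.foldr_cons, ih]
    by_cases h : 0 < z.2.1
    · simp [pvBAsmStep, h, PySem.List.insert_zero, pvSuff, pvTS, pvGS, add_comm]
    · simp [pvBAsmStep, h]

-- ===== VERDICT (by name: the statement is the Claim_ definition above) =====
theorem calculate_size_distribution_spec : Claim_equal_calculate_size_distribution := by
  unfold Claim_equal_calculate_size_distribution Spec_calculate_size_distribution
  intro tcs _
  by_cases h : tcs = []
  · subst h; rfl
  · -- A's value, via the phase-1 and cumulative-loop characterizations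
    have hcum := pvA_cum ((pvBins.filter (fun b => decide (0 < pvCnt b.1 b.2.1 tcs))).map
        (fun b => (b.2.2, pvSum b.1 b.2.1 tcs, 0, pvCnt b.1 b.2.1 tcs))) [] 0 0
    simp only [List.append_nil] at hcum
    have hA : calculate_size_distribution tcs =
        ((pvBins.filter (fun b => decide (0 < pvCnt b.1 b.2.1 tcs))).map
            (fun b => (b.2.2, pvCnt b.1 b.2.1 tcs)),
         pvSuff ((pvBins.filter (fun b => decide (0 < pvCnt b.1 b.2.1 tcs))).map
            (fun b => (b.2.2, pvSum b.1 b.2.1 tcs, 0, pvCnt b.1 b.2.1 tcs))) 0 0) := by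
      simp only [calculate_size_distribution, if_neg h, pvA_phase1, List.nil_append,
        PySem.List.len_eq]
      rw [hcum]
    -- B's value, via the histogram and assembly characterizations
    have hzs : pvLabels.zip
        (((tcs.foldl pvBHistStep ([0,0,0,0,0,0,0,0,0,0],[0,0,0,0,0,0,0,0,0,0])).1).zip
         ((tcs.foldl pvBHistStep ([0,0,0,0,0,0,0,0,0,0],[0,0,0,0,0,0,0,0,0,0])).2)) =
        pvBins.map (fun b => (b.2.2, pvCnt b.1 b.2.1 tcs, pvSum b.1 b.2.1 tcs)) := by
      rw [pvB_hist]
      simp [pvLabels, pvBins]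
    have hB : calculate_size_distribution_alt tcs =
        (((pvBins.map (fun b => (b.2.2, pvCnt b.1 b.2.1 tcs, pvSum b.1 b.2.1 tcs))).filter
            (fun z => decide (0 < z.2.1))).map (fun z => (z.1, z.2.1)),
         pvSuff (((pvBins.map (fun b => (b.2.2, pvCnt b.1 b.2.1 tcs, pvSum b.1 b.2.1 tcs))).filter
            (fun z => decide (0 < z.2.1))).map (fun z => (z.1, z.2.2, 0, z.2.1))) 0 0) := by
      simp only [calculate_size_distribution_alt, hzs, List.foldl_reverse, pvB_asm]
    rw [hA, hB, List.filter_map, List.map_map, List.map_map]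
    rfl
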